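-- pv_equiv track=rewrite | github.com/lightthgil/textPer | spec/views.py | getPerPrcsBase
-- ===== SOURCE A (Python) =====
-- def getPerPrcsBase(requestPrimNameList, requestPrimIdList):
--     outSrting = '不需要修改'
--     if len(requestPrimIdList) > 0:
--         primIdLast = requestPrimIdList[0]
--         index = 0
--         for primId in requestPrimIdList[1:]:
--             index += 1
--             if not (primId == (primIdLast + 1)):
--                 primIdStart = requestPrimNameList[index]
--                 outSrting = '''
-- INT CPerProcessBase<PerNodeType, PerPrimType>::GetPrimHw()
-- {
-- 	for (UShort offSet = 0; offSet < perFbInfoTable[m_fbType].primNum; ++offSet)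
-- 	{
-- 		if (m_perPrimData[offSet].Length())
-- 		{
-- 				//...........
--
-- 				else if (perFbInfoTable[m_fbType].idBase == LPerPrimId_''' + requestPrimNameList[0] + ''' && offSet > ''' + str(index) + ''')
-- 				{
-- 					tmp_primid = LPerPrimId_''' + primIdStart + ''' + offSet - ''' + str(index + 1) + ''';
-- 				}
-- 				//..........
-- 		}
-- 	}
-- }'''
--
--             primIdLast = primId
--
--     return outSrting
-- ===== SOURCE B (Python) =====
-- # B: instead of a forward scan that rebuilds the output at every gap, scan from
-- # the end for the FIRST (= last) gap index and format the C++ string exactly once.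
--
-- _P1 = '''
-- INT CPerProcessBase<PerNodeType, PerPrimType>::GetPrimHw()
-- {
-- 	for (UShort offSet = 0; offSet < perFbInfoTable[m_fbType].primNum; ++offSet)
-- 	{
-- 		if (m_perPrimData[offSet].Length())
-- 		{
-- 				//...........
--
-- 				else if (perFbInfoTable[m_fbType].idBase == LPerPrimId_'''
-- _P2 = ' && offSet > '
-- _P3 = ''')
-- 				{
-- 					tmp_primid = LPerPrimId_'''
-- _P4 = ' + offSet - '
-- _P5 = ''';
-- 				}
-- 				//..........
-- 		}
-- 	}
-- }'''
--
--
-- def getPerPrcsBase(requestPrimNameList, requestPrimIdList):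
--     for i in range(len(requestPrimIdList) - 1, 0, -1):
--         if requestPrimIdList[i] != requestPrimIdList[i - 1] + 1:
--             return (_P1 + requestPrimNameList[0] + _P2 + str(i)
--                     + _P3 + requestPrimNameList[i] + _P4 + str(i + 1) + _P5)
--     return '不需要修改'
-- ===== Notes on version B (the rewrite author's own statement) =====
-- stated objective: simpler
-- what changed: A's forward loop rebuilds the whole output string at every detected gap and keeps the last rebuild; B scans backwards from the end, stops at the first (= last) gap index, and formats the C++ template exactly once from five shared constant pieces.
import Mathlib
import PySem

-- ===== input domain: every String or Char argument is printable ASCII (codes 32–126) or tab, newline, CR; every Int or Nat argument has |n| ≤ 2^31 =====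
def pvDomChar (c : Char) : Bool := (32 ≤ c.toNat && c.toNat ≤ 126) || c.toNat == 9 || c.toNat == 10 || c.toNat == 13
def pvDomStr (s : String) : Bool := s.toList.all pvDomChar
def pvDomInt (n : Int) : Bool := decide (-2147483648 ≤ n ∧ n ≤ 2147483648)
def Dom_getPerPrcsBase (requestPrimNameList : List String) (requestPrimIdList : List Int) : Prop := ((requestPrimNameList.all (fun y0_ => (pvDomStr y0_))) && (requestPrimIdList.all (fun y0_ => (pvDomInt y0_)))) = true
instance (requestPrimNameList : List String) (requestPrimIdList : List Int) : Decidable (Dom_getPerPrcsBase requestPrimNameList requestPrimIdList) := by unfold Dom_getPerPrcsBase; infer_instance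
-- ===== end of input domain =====

-- B replaces A's forward loop (which rebuilds the output string at every gap) by a backward
-- scan that finds the last gap index once and formats the string once (objective: simpler).

-- ===== PORT A =====
-- the five constant pieces of the C++ template (shared text of both programs)
def pvP1 : String := "\nINT CPerProcessBase<PerNodeType, PerPrimType>::GetPrimHw()\n{\n\tfor (UShort offSet = 0; offSet < perFbInfoTable[m_fbType].primNum; ++offSet)\n\t{\n\t\tif (m_perPrimData[offSet].Length())\n\t\t{\n\t\t\t\t//...........\n\t\t\t\t\t\t\n\t\t\t\telse if (perFbInfoTable[m_fbType].idBase == LPerPrimId_"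
def pvP2 : String := " && offSet > "
def pvP3 : String := ")\n\t\t\t\t{\n\t\t\t\t\ttmp_primid = LPerPrimId_"
def pvP4 : String := " + offSet - "
def pvP5 : String := "; \t\n\t\t\t\t}\n\t\t\t\t//..........\n\t\t}\n\t}\n}"

-- A's loop body: state (outSrting, primIdLast, index)
def pvStepA (requestPrimNameList : List String) (st : String × Int × Int) (primId : Int) : String × Int × Int :=
  let index := st.2.2 + 1
  let outSrting :=
    if ¬ (primId = st.2.1 + 1) then
      let primIdStart := PySem.List.pyGetD requestPrimNameList index ""
      pvP1 ++ PySem.List.pyGetD requestPrimNameList 0 "" ++ pvP2 ++ PySem.Int.toStr index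
        ++ pvP3 ++ primIdStart ++ pvP4 ++ PySem.Int.toStr (index + 1) ++ pvP5
    else st.1
  (outSrting, primId, index)

def getPerPrcsBase (requestPrimNameList : List String) (requestPrimIdList : List Int) : String :=
  match requestPrimIdList with
  | [] => "不需要修改"
  | primIdFirst :: rest =>
    (rest.foldl (pvStepA requestPrimNameList) ("不需要修改", primIdFirst, (0 : Int))).1

-- ===== PORT B =====
-- backward scan: first i in len-1, …, 1 with ids[i] ≠ ids[i-1]+1 (Python's range(len-1, 0, -1))
def pvLastGap (requestPrimIdList : List Int) : Nat → Option Nat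
  | 0 => none
  | i + 1 =>
    if ¬ (PySem.List.pyGetD requestPrimIdList (↑(i + 1)) 0
            = PySem.List.pyGetD requestPrimIdList (↑i) 0 + 1) then some (i + 1)
    else pvLastGap requestPrimIdList i

def getPerPrcsBase_alt (requestPrimNameList : List String) (requestPrimIdList : List Int) : String :=
  match pvLastGap requestPrimIdList (requestPrimIdList.length - 1) with
  | none => "不需要修改"
  | some i =>
    pvP1 ++ PySem.List.pyGetD requestPrimNameList 0 "" ++ pvP2 ++ PySem.Int.toStr (↑i)
      ++ pvP3 ++ PySem.List.pyGetD requestPrimNameList (↑i) "" ++ pvP4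
      ++ PySem.Int.toStr (↑i + 1) ++ pvP5

-- ===== PRECONDITION & SPEC =====
-- Pre_ excludes exactly the inputs on which A raises IndexError: a gap at index i with
-- requestPrimNameList shorter than i+1 (A reads requestPrimNameList[i] and [0] there; B raises too).
def Pre_getPerPrcsBase (requestPrimNameList : List String) (requestPrimIdList : List Int) : Prop :=
  ∀ i ∈ List.range requestPrimIdList.length,
    1 ≤ i → requestPrimIdList.getD i 0 ≠ requestPrimIdList.getD (i - 1) 0 + 1 →
      i < requestPrimNameList.length
instance (requestPrimNameList : List String) (requestPrimIdList : List Int) : Decidable (Pre_getPerPrcsBase requestPrimNameList requestPrimIdList) := by unfold Pre_getPerPrcsBase; infer_instance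
def pvWitness_getPerPrcsBase : List String × List Int := (["A", "B"], [1, 3])

def Spec_getPerPrcsBase (requestPrimNameList : List String) (requestPrimIdList : List Int) (out : String) : Prop := out = getPerPrcsBase_alt requestPrimNameList requestPrimIdList
instance (requestPrimNameList : List String) (requestPrimIdList : List Int) (out : String) : Decidable (Spec_getPerPrcsBase requestPrimNameList requestPrimIdList out) := by unfold Spec_getPerPrcsBase; infer_instance

-- ===== CLAIM (what is proved, stated in full; the proofs are below) =====
def Claim_equal_getPerPrcsBase : Prop := ∀ (requestPrimNameList : List String) (requestPrimIdList : List Int), Dom_getPerPrcsBase requestPrimNameList requestPrimIdList → Pre_getPerPrcsBase requestPrimNameList requestPrimIdList → Spec_getPerPrcsBase requestPrimNameList requestPrimIdList (getPerPrcsBase requestPrimNameList requestPrimIdList)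

-- ===== LEMMAS AND PROOFS =====

-- gap predicate at index i (used with i ≥ 1)
def pvGap (ids : List Int) (i : Nat) : Bool :=
  decide (¬ (PySem.List.pyGetD ids (↑i) 0 = PySem.List.pyGetD ids (↑(i - 1)) 0 + 1))

-- the string both programs emit for gap index j
def pvOut (names : List String) (j : Nat) : String :=
  pvP1 ++ PySem.List.pyGetD names 0 "" ++ pvP2 ++ PySem.Int.toStr (↑j)
    ++ pvP3 ++ PySem.List.pyGetD names (↑j) "" ++ pvP4 ++ PySem.Int.toStr (↑j + 1) ++ pvP5

theorem pvLastGap_eq (ids : List Int) (k : Nat) :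
    pvLastGap ids k = ((List.range' 1 k).filter (pvGap ids)).getLast? := by
  induction k with
  | zero => simp [pvLastGap]
  | succ k ih =>
    have hr : List.range' 1 (k + 1) = List.range' 1 k ++ [1 + k] := by
      rw [List.range'_concat]; norm_num
    have hstep : pvLastGap ids (k + 1)
        = if pvGap ids (k + 1) = true then some (k + 1) else pvLastGap ids k := by
      simp only [pvLastGap, pvGap, Nat.add_sub_cancel, decide_eq_true_eq]
    rw [hstep, hr, List.filter_append, List.getLast?_append]
    cases hg : pvGap ids (k + 1) with
    | true => simp [Nat.add_comm 1 k, hg]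
    | false => simp [Nat.add_comm 1 k, hg, ih]

theorem pvFold_eq (names : List String) (ids : List Int) :
    ∀ (l : List Int) (idx : Nat) (last : Int) (out : String),
      ids.drop idx = last :: l →
      (l.foldl (pvStepA names) (out, last, (↑idx : Int))).1 =
      match ((List.range' (idx + 1) l.length).filter (pvGap ids)).getLast? with
      | none => out
      | some j => pvOut names j := by
  intro l
  induction l with
  | nil => intro idx last out _; simp
  | cons p l' ih =>
    intro idx last out hdrop
    have h0 : ids[idx]? = some last := by
      rw [← List.head?_drop, hdrop]; rfl
    have hdrop' : ids.drop (idx + 1) = p :: l' := by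
      rw [← List.tail_drop, hdrop]; rfl
    have h1 : ids[idx + 1]? = some p := by
      rw [← List.head?_drop, hdrop']; rfl
    have hgap : pvGap ids (idx + 1) = decide (¬ (p = last + 1)) := by
      simp only [pvGap, Nat.add_sub_cancel, PySem.List.pyGetD_natCast,
        List.getD_eq_getElem?_getD, h0, h1, Option.getD_some]
    have e1 : ((idx + 1 : Nat) : Int) = (idx : Int) + 1 := by push_cast; ring
    have hstep : pvStepA names (out, last, (↑idx : Int)) p
        = ((if ¬ (p = last + 1) then pvOut names (idx + 1) else out), p, (↑(idx + 1) : Int)) := by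
      simp only [pvStepA, pvOut, e1]
    rw [List.foldl_cons, hstep, ih (idx + 1) p _ hdrop']
    have hrange : List.range' (idx + 1) (p :: l').length
        = (idx + 1) :: List.range' (idx + 1 + 1) l'.length := by
      rw [List.length_cons]; exact List.range'_succ ..
    rw [hrange, List.filter_cons]
    by_cases hp : p = last + 1
    · have hg : pvGap ids (idx + 1) = false := by simp [hgap, hp]
      simp [hg, hp]
    · have hg : pvGap ids (idx + 1) = true := by simp [hgap, hp]
      cases hlast : ((List.range' (idx + 1 + 1) l'.length).filter (pvGap ids)).getLast? with
      | some j =>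
        have hcons : ((idx + 1) :: (List.range' (idx + 1 + 1) l'.length).filter (pvGap ids)).getLast? = some j := by
          rw [show ((idx + 1) :: (List.range' (idx + 1 + 1) l'.length).filter (pvGap ids))
                = [idx + 1] ++ (List.range' (idx + 1 + 1) l'.length).filter (pvGap ids) from rfl,
             List.getLast?_append, hlast]; rfl
        simp [hg, hcons]
      | none =>
        have hcons : ((idx + 1) :: (List.range' (idx + 1 + 1) l'.length).filter (pvGap ids)).getLast? = some (idx + 1) := by
          rw [show ((idx + 1) :: (List.range' (idx + 1 + 1) l'.length).filter (pvGap ids))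
                = [idx + 1] ++ (List.range' (idx + 1 + 1) l'.length).filter (pvGap ids) from rfl,
             List.getLast?_append, hlast]; rfl
        simp [hg, hcons, hp]

theorem pvAlt_eq (names : List String) (ids : List Int) :
    getPerPrcsBase_alt names ids
      = match ((List.range' 1 (ids.length - 1)).filter (pvGap ids)).getLast? with
        | none => "不需要修改"
        | some j => pvOut names j := by
  rw [getPerPrcsBase_alt, pvLastGap_eq]
  cases ((List.range' 1 (ids.length - 1)).filter (pvGap ids)).getLast? with
  | none => rfl
  | some j => rfl

-- ===== VERDICT (by name: the statement is the Claim_ definition above) =====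
theorem getPerPrcsBase_spec : Claim_equal_getPerPrcsBase := by
  intro names ids _ _
  unfold Spec_getPerPrcsBase
  rw [pvAlt_eq]
  match ids with
  | [] => rfl
  | a :: rest =>
    have h := pvFold_eq names (a :: rest) rest 0 a "不需要修改" (by simp)
    simp only [Nat.cast_zero] at h
    simp only [getPerPrcsBase, h, List.length_cons, Nat.add_sub_cancel, Nat.zero_add]
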